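-- pv_equiv track=rewrite | github.com/shaharrcohen/Dynamic-Programming-Project-Algorithmic-Analysis-of-LCS-LIS | LongestSubsequence.py | all_lis
-- ===== SOURCE A (Python) =====
-- def all_lis(A: list[int], C: list[int], teta: int) -> list[list[int]]:
--     allowed = [A[i] for i in range(len(A)) if C[i] == 1]
--     if not allowed:
--         return []
--
--     n = len(allowed)
--     dp = [1] * n
--     for i in range(n):
--         for j in range(i):
--             if allowed[j] < allowed[i]:
--                 dp[i] = max(dp[i], dp[j] + 1)
--
--     L = max(dp)
--     results = []
--
--     def backtrack(i):
--         if dp[i] == 1: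
--             return [[allowed[i]]]
--         res = []
--         for j in range(i):
--             if allowed[j] < allowed[i] and dp[j] == dp[i] - 1:
--                 for seq in backtrack(j):
--                     res.append(seq + [allowed[i]])
--         return res
--
--     for i in range(n):
--         if dp[i] == L:
--             results.extend(backtrack(i))
--
--     results.sort()
--     return results[:teta]
-- ===== SOURCE B (Python) =====
-- def all_lis(A: list[int], C: list[int], teta: int) -> list[list[int]]:
--     allowed = [a for a, c in zip(A, C) if c == 1]
--     if not allowed:
--         return []
--
--     # Bottom-up DP: one forward pass builds, for each position, the length of the
--     # longest increasing subsequence ending there together with the list of ALL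
--     # such subsequences (memoised, instead of A's recomputing recursion).
--     table = []  # entries (value, length, all LIS ending at this value)
--     for x in allowed:
--         best = 0
--         seqs = []
--         for v, l, s in table:
--             if v < x:
--                 if l > best:
--                     best = l
--                     seqs = list(s)
--                 elif l == best:
--                     seqs.extend(s)
--         if best == 0:
--             table.append((x, 1, [[x]]))
--         else:
--             table.append((x, best + 1, [q + [x] for q in seqs]))
--
--     L = max(l for _, l, _ in table)
--     results = [q for _, l, s in table if l == L for q in s]
--     results.sort()
--     return results[:teta]
-- ===== Notes on version B (the rewrite author's own statement) =====
-- stated objective: alternative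
-- what changed: Replaces A's separate dp-array pass plus top-down recomputing backtrack recursion by a single forward pass that builds, bottom-up and memoised, for every position the LIS length ending there together with the list of all LIS ending there.
import Mathlib
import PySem

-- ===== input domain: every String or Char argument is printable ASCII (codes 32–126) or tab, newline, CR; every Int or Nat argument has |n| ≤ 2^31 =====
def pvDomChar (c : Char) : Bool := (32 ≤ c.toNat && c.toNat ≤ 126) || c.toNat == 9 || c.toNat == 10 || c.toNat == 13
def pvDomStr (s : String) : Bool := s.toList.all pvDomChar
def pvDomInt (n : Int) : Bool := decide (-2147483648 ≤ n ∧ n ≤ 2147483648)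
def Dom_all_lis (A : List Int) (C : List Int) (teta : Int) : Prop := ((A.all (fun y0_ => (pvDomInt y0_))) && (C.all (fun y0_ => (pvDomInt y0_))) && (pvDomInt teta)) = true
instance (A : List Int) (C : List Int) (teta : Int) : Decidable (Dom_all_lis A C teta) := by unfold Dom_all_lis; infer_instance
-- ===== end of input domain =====

-- B replaces A's dp pass + recomputing top-down backtrack recursion by one forward pass
-- building, for each position, the LIS length ending there with all LIS ending there (alternative decomposition).

-- ===== PORT A =====
-- allowed = [A[i] for i in range(len(A)) if C[i] == 1]; pyGet? C i = none is Python's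
-- IndexError (len(C) < len(A)), excluded by Pre_all_lis; within Pre_ this is exact.
def pvAllowedA (A C : List Int) : List Int :=
  (List.range A.length).filterMap (fun (i : Nat) =>
    match PySem.List.pyGet? C (i : Int) with
    | some c => if c == 1 then PySem.List.pyGet? A (i : Int) else none
    | none => none)

-- dp = [1]*n; for i in range(n): for j in range(i): if a[j] < a[i]: dp[i] = max(dp[i], dp[j]+1)
def pvDpA (a : List Int) : List Int :=
  (List.range a.length).foldl (fun dp i =>
    (List.range i).foldl (fun dp j =>
      if a.getD j 0 < a.getD i 0 then dp.set i (max (dp.getD i 0) (dp.getD j 0 + 1)) else dp) dp)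
    (List.replicate a.length 1)

-- def backtrack(i): ...
def pvBacktrackA (a dp : List Int) (i : Nat) : List (List Int) :=
  if dp.getD i 0 == 1 then [[a.getD i 0]]
  else (List.range i).attach.foldl (fun res j =>
    if a.getD j.1 0 < a.getD i 0 ∧ dp.getD j.1 0 == dp.getD i 0 - 1 then
      res ++ (pvBacktrackA a dp j.1).map (fun q => q ++ [a.getD i 0])
    else res) []
termination_by i
decreasing_by exact List.mem_range.mp j.2

def all_lis (A : List Int) (C : List Int) (teta : Int) : List (List Int) :=
  let allowed := pvAllowedA A C
  if allowed = [] then []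
  else
    let dp := pvDpA allowed
    let L := (PySem.List.max? dp (fun v => v)).getD 0   -- max(dp); dp is nonempty in this branch
    let results := (List.range allowed.length).foldl
      (fun res i => if dp.getD i 0 == L then res ++ pvBacktrackA allowed dp i else res) []
    PySem.List.slice (PySem.List.sorted results (fun q => q) false) none (some teta)

-- ===== PORT B =====
-- allowed = [a for a, c in zip(A, C) if c == 1]
def pvAllowedB (A C : List Int) : List Int :=
  (A.zip C).filterMap (fun p => if p.2 == 1 then some p.1 else none)

-- inner loop of B: best/seqs over the table built so far
def pvBestB (table : List (Int × Int × List (List Int))) (x : Int) : Int × List (List Int) :=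
  table.foldl (fun acc t =>
    if t.1 < x then
      if t.2.1 > acc.1 then (t.2.1, t.2.2)
      else if t.2.1 == acc.1 then (acc.1, acc.2 ++ t.2.2)
      else acc
    else acc) (0, [])

def pvStepB (table : List (Int × Int × List (List Int))) (x : Int) : List (Int × Int × List (List Int)) :=
  let bs := pvBestB table x
  if bs.1 == 0 then table ++ [(x, 1, [[x]])]
  else table ++ [(x, bs.1 + 1, bs.2.map (fun q => q ++ [x]))]

def all_lis_alt (A : List Int) (C : List Int) (teta : Int) : List (List Int) :=
  let allowed := pvAllowedB A C
  if allowed = [] then []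
  else
    let table := allowed.foldl pvStepB []
    let L := (PySem.List.max? (table.map (fun t => t.2.1)) (fun v => v)).getD 0
    let results := table.flatMap (fun t => if t.2.1 == L then t.2.2 else [])
    PySem.List.slice (PySem.List.sorted results (fun q => q) false) none (some teta)

-- ===== PRECONDITION & SPEC =====
-- Pre_ excludes exactly the inputs where A raises IndexError: the comprehension reads C[i] for every i < len(A).
def Pre_all_lis (A : List Int) (C : List Int) (teta : Int) : Prop := A.length ≤ C.length
instance (A : List Int) (C : List Int) (teta : Int) : Decidable (Pre_all_lis A C teta) := by unfold Pre_all_lis; infer_instance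
def pvWitness_all_lis : List Int × List Int × Int := ([1, 2], [1, 1], 5)

def Spec_all_lis (A : List Int) (C : List Int) (teta : Int) (out : List (List Int)) : Prop := out = all_lis_alt A C teta
instance (A : List Int) (C : List Int) (teta : Int) (out : List (List Int)) : Decidable (Spec_all_lis A C teta out) := by unfold Spec_all_lis; infer_instance

-- ===== CLAIM (what is proved, stated in full; the proofs are below) =====
def Claim_equal_all_lis : Prop := ∀ (A : List Int) (C : List Int) (teta : Int), Dom_all_lis A C teta → Pre_all_lis A C teta → Spec_all_lis A C teta (all_lis A C teta)

-- ===== LEMMAS AND PROOFS =====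

-- the two 'allowed' comprehensions agree when len(A) ≤ len(C)
theorem pv_allowed_eq (A C : List Int) (h : A.length ≤ C.length) : pvAllowedA A C = pvAllowedB A C := by
  induction A generalizing C with
  | nil => simp [pvAllowedA, pvAllowedB]
  | cons x A ih =>
    match C with
    | [] => simp at h
    | c :: C' =>
      have h' : A.length ≤ C'.length := by simpa using h
      rw [pvAllowedA, pvAllowedB]
      simp only [List.length_cons, List.range_succ_eq_map, List.filterMap_cons, List.filterMap_map,
        List.zip_cons_cons]
      have h0 : PySem.List.pyGet? (c :: C') ((0 : Nat) : Int) = some c := by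
        simpa using PySem.List.pyGet?_zero_cons c C'
      have hx : PySem.List.pyGet? (x :: A) ((0 : Nat) : Int) = some x := by
        simpa using PySem.List.pyGet?_zero_cons x A
      have hcomp : ∀ i : Nat,
          (match PySem.List.pyGet? (c :: C') ((i.succ : Nat) : Int) with
            | some c' => if c' == 1 then PySem.List.pyGet? (x :: A) ((i.succ : Nat) : Int) else none
            | none => none)
          = (match PySem.List.pyGet? C' ((i : Nat) : Int) with
            | some c' => if c' == 1 then PySem.List.pyGet? A ((i : Nat) : Int) else none
            | none => none) := by
        intro i
        have hcast : ((i.succ : Nat) : Int) = ((i : Nat) : Int) + 1 := by push_cast; ring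
        rw [hcast, PySem.List.pyGet?_cons_succ, PySem.List.pyGet?_cons_succ]
      rw [h0, Function.comp_def]
      rw [List.filterMap_congr (fun i _ => hcomp i)]
      have hrec : List.filterMap (fun (i : Nat) =>
          match PySem.List.pyGet? C' ((i : Nat) : Int) with
          | some c' => if c' == 1 then PySem.List.pyGet? A ((i : Nat) : Int) else none
          | none => none) (List.range A.length) = pvAllowedB A C' := by
        rw [← ih C' h', pvAllowedA]
      rw [hrec, pvAllowedB]
      by_cases hc : c == 1
      · simp [hc]
      · simp [hc]

-- functional form of A's dp recurrence
def pvDpF (a : List Int) : Nat → Int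
  | i => ((List.range i).attach).foldl
      (fun m j => if a.getD j.1 0 < a.getD i 0 then max m (pvDpF a j.1 + 1) else m) 1
termination_by i => i
decreasing_by exact List.mem_range.mp j.2

theorem pvDpF_eq (a : List Int) (i : Nat) : pvDpF a i =
    (List.range i).foldl (fun m j => if a.getD j 0 < a.getD i 0 then max m (pvDpF a j + 1) else m) 1 := by
  rw [pvDpF]
  exact @List.foldl_attach _ _ (List.range i) (fun m j => if a.getD j 0 < a.getD i 0 then max m (pvDpF a j + 1) else m) 1

-- guarded max fold = plain max fold over the filtered mapped list
theorem pv_guardmax_eq {p : Nat → Prop} [DecidablePred p] (g : Nat → Int) (l : List Nat) (c : Int) :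
    l.foldl (fun m j => if p j then max m (g j) else m) c
      = (((l.filter (fun j => decide (p j))).map g).foldl max c) := by
  induction l generalizing c with
  | nil => rfl
  | cons j l ih =>
    by_cases hp : p j
    · simp [hp, ih]
    · simp [hp, ih]

theorem pvDpF_pos (a : List Int) (i : Nat) : 1 ≤ pvDpF a i := by
  rw [pvDpF_eq, pv_guardmax_eq]
  exact (PySem.List.le_foldl_max _ _).1

-- running max of dp-values of admissible predecessors
def pvMax (a : List Int) (x : Int) (m : Nat) : Int :=
  (List.range m).foldl (fun b j => if a.getD j 0 < x then max b (pvDpF a j) else b) 0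

theorem pvMax_nonneg (a : List Int) (x : Int) (m : Nat) : 0 ≤ pvMax a x m := by
  rw [pvMax, pv_guardmax_eq]
  exact (PySem.List.le_foldl_max _ _).1

theorem pvMax_isMax (a : List Int) (x : Int) (m : Nat) (j : Nat) (hj : j < m)
    (hlt : a.getD j 0 < x) : pvDpF a j ≤ pvMax a x m := by
  rw [pvMax, pv_guardmax_eq]
  refine (PySem.List.le_foldl_max _ _).2 _ ?_
  exact List.mem_map_of_mem (List.mem_filter.mpr ⟨List.mem_range.mpr hj, by simpa using hlt⟩)

theorem pv_fold1_closed {p : Nat → Prop} [DecidablePred p] (g : Nat → Int) (hg : ∀ j, 1 ≤ g j) (m : Nat) :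
    0 ≤ (List.range m).foldl (fun b j => if p j then max b (g j) else b) 0 ∧
    (List.range m).foldl (fun c j => if p j then max c (g j + 1) else c) 1
      = (if (List.range m).foldl (fun b j => if p j then max b (g j) else b) 0 = 0 then 1
         else (List.range m).foldl (fun b j => if p j then max b (g j) else b) 0 + 1) := by
  induction m with
  | zero => simp
  | succ m ih =>
    simp only [List.range_succ, List.foldl_append, List.foldl_cons, List.foldl_nil]
    obtain ⟨h0, h1⟩ := ih
    by_cases hp : p m
    · simp only [if_pos hp]
      have := hg m
      constructor
      · omega
      · rw [h1]; split_ifs <;> omega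
    · simpa [hp] using ⟨h0, h1⟩

theorem pvDpF_closed (a : List Int) (k : Nat) :
    pvDpF a k = if pvMax a (a.getD k 0) k = 0 then 1 else pvMax a (a.getD k 0) k + 1 := by
  rw [pvDpF_eq, pvMax]
  exact (pv_fold1_closed (p := fun j => a.getD j 0 < a.getD k 0) (pvDpF a) (pvDpF_pos a) k).2

-- A's dp array is pointwise pvDpF
theorem pv_getD_set_self (l : List Int) (i : Nat) (v : Int) (h : i < l.length) :
    (l.set i v).getD i 0 = v := by
  simp [List.getD_eq_getElem?_getD, h]

theorem pv_getD_set_ne (l : List Int) (i j : Nat) (v : Int) (h : j ≠ i) :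
    (l.set i v).getD j 0 = l.getD j 0 := by
  simp [List.getD_eq_getElem?_getD, List.getElem?_set_ne (by omega : i ≠ j)]

theorem pv_inner_set (a : List Int) (i : Nat) :
    ∀ (js : List Nat) (dp : List Int), i < dp.length → (∀ j ∈ js, j ≠ i) →
    js.foldl (fun d j => if a.getD j 0 < a.getD i 0 then d.set i (max (d.getD i 0) (d.getD j 0 + 1)) else d) dp
      = dp.set i (js.foldl (fun m j => if a.getD j 0 < a.getD i 0 then max m (dp.getD j 0 + 1) else m) (dp.getD i 0)) := by
  intro js
  induction js with
  | nil =>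
    intro dp hlen _
    simp only [List.foldl_nil]
    rw [List.getD_eq_getElem dp 0 hlen]
    exact (List.set_getElem_self hlen).symm
  | cons j js ih =>
    intro dp hlen hne
    by_cases hc : a.getD j 0 < a.getD i 0
    · simp only [List.foldl_cons, if_pos hc]
      rw [ih (dp.set i (max (dp.getD i 0) (dp.getD j 0 + 1))) (by simpa using hlen)
            (fun j' hj' => hne j' (List.mem_cons_of_mem _ hj'))]
      rw [List.set_set]
      rw [pv_getD_set_self _ _ _ hlen]
      congr 1
      exact PySem.List.foldl_congr_mem _ _ _ _ (fun m j' hj' => by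
        rw [pv_getD_set_ne _ _ _ _ (hne j' (List.mem_cons_of_mem _ hj'))])
    · simp only [List.foldl_cons, if_neg hc]
      exact ih dp hlen (fun j' hj' => hne j' (List.mem_cons_of_mem _ hj'))

theorem pvDpA_partial (a : List Int) (k : Nat) (hk : k ≤ a.length) :
    (List.range k).foldl (fun dp i =>
      (List.range i).foldl (fun dp j =>
        if a.getD j 0 < a.getD i 0 then dp.set i (max (dp.getD i 0) (dp.getD j 0 + 1)) else dp) dp)
      (List.replicate a.length 1)
    = (List.range a.length).map (fun i => if i < k then pvDpF a i else 1) := by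
  induction k with
  | zero =>
    simp only [List.range_zero, List.foldl_nil]
    apply List.ext_getElem
    · simp
    · intro m h1 h2
      simp only [List.getElem_replicate, List.getElem_map, List.getElem_range]
      simp
  | succ k ih =>
    have hk' : k ≤ a.length := by omega
    have hkn : k < a.length := by omega
    rw [List.range_succ, List.foldl_append, ih hk', List.foldl_cons, List.foldl_nil]
    rw [pv_inner_set a k (List.range k) _
          (by simpa using hkn)
          (fun j hj => by have := List.mem_range.mp hj; omega)]
    have hstart : ((List.range a.length).map (fun i => if i < k then pvDpF a i else 1)).getD k 0 = 1 := by
      rw [PySem.List.getD_map_range _ _ _ _ hkn]; simp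
    have hscal : (List.range k).foldl
        (fun m j => if a.getD j 0 < a.getD k 0 then
          max m (((List.range a.length).map (fun i => if i < k then pvDpF a i else 1)).getD j 0 + 1) else m)
        (((List.range a.length).map (fun i => if i < k then pvDpF a i else 1)).getD k 0)
        = pvDpF a k := by
      rw [hstart, pvDpF_eq]
      exact (PySem.List.foldl_congr_mem _ _ _ _ (fun m j hj => by
        have hj' := List.mem_range.mp hj
        rw [PySem.List.getD_map_range _ _ _ _ (by omega), if_pos hj'])).symm
    rw [hscal]
    apply List.ext_getElem
    · simp
    · intro m h1 h2
      simp only [List.getElem_set, List.getElem_map, List.getElem_range] at *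
      split_ifs with hA hB hC <;> first
        | rfl
        | omega
        | (subst hA; rfl)

theorem pvDpA_eq (a : List Int) : pvDpA a = (List.range a.length).map (pvDpF a) := by
  rw [pvDpA, pvDpA_partial a a.length le_rfl]
  exact List.map_congr_left (fun i hi => if_pos (List.mem_range.mp hi))

theorem pvDpA_getD (a : List Int) (i : Nat) (hi : i < a.length) : (pvDpA a).getD i 0 = pvDpF a i := by
  rw [pvDpA_eq]; exact PySem.List.getD_map_range _ _ _ _ hi

-- normal form of backtrack(i)
theorem pvBacktrackA_nf (a : List Int) (i : Nat) (hi : i < a.length) :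
    pvBacktrackA a (pvDpA a) i =
      if pvDpF a i = 1 then [[a.getD i 0]]
      else (List.range i).flatMap (fun j =>
        if a.getD j 0 < a.getD i 0 ∧ pvDpF a j = pvDpF a i - 1 then
          (pvBacktrackA a (pvDpA a) j).map (fun q => q ++ [a.getD i 0])
        else []) := by
  conv_lhs => rw [pvBacktrackA]
  rw [pvDpA_getD a i hi]
  simp only [beq_iff_eq]
  split_ifs with h1
  · rfl
  · rw [@List.foldl_attach _ _ (List.range i)
        (fun res j => if a.getD j 0 < a.getD i 0 ∧ (pvDpA a).getD j 0 = pvDpF a i - 1 then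
          res ++ (pvBacktrackA a (pvDpA a) j).map (fun q => q ++ [a.getD i 0]) else res) []]
    rw [PySem.List.foldl_congr_mem _ _
        (fun res j => res ++ (if a.getD j 0 < a.getD i 0 ∧ pvDpF a j = pvDpF a i - 1 then
          (pvBacktrackA a (pvDpA a) j).map (fun q => q ++ [a.getD i 0]) else [])) _
        (fun res j hj => by
          rw [pvDpA_getD a j (by have := List.mem_range.mp hj; omega)]
          split_ifs with h
          · beta_reduce; rw [if_pos h]
          · beta_reduce; rw [if_neg h, List.append_nil])]
    rw [PySem.List.foldl_append_eq_flatMap]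
    rfl

-- B's inner fold over the (already characterised) table
theorem pvBestB_eq (a : List Int) (x : Int) (k : Nat) :
    pvBestB ((List.range k).map (fun j => (a.getD j 0, pvDpF a j, pvBacktrackA a (pvDpA a) j))) x
      = (pvMax a x k,
         (List.range k).flatMap (fun j =>
           if a.getD j 0 < x ∧ pvDpF a j = pvMax a x k then pvBacktrackA a (pvDpA a) j else [])) := by
  induction k with
  | zero => simp [pvBestB, pvMax]
  | succ k ih =>
    have hmax : pvMax a x (k + 1) = if a.getD k 0 < x then max (pvMax a x k) (pvDpF a k) else pvMax a x k := by
      rw [pvMax, pvMax, List.range_succ, List.foldl_append]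
      simp
    have hstep : pvBestB ((List.range (k + 1)).map (fun j => (a.getD j 0, pvDpF a j, pvBacktrackA a (pvDpA a) j))) x
        = (fun acc (t : Int × Int × List (List Int)) =>
            if t.1 < x then
              if t.2.1 > acc.1 then (t.2.1, t.2.2)
              else if t.2.1 == acc.1 then (acc.1, acc.2 ++ t.2.2)
              else acc
            else acc)
          (pvBestB ((List.range k).map (fun j => (a.getD j 0, pvDpF a j, pvBacktrackA a (pvDpA a) j))) x)
          (a.getD k 0, pvDpF a k, pvBacktrackA a (pvDpA a) k) := by
      rw [pvBestB, pvBestB, List.range_succ, List.map_append, List.foldl_append]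
      rfl
    rw [hstep, ih, List.range_succ, List.flatMap_append, hmax]
    by_cases hx : a.getD k 0 < x
    · by_cases hgt : pvDpF a k > pvMax a x k
      · have htgt : max (pvMax a x k) (pvDpF a k) = pvDpF a k := by omega
        simp only [if_pos hx, if_pos hgt, htgt]
        have hnil : (List.range k).flatMap (fun j =>
            if a.getD j 0 < x ∧ pvDpF a j = pvDpF a k then pvBacktrackA a (pvDpA a) j else []) = [] := by
          rw [List.flatMap_eq_nil_iff]
          intro j hj
          rw [if_neg]
          rintro ⟨hjx, hje⟩
          have := pvMax_isMax a x k j (List.mem_range.mp hj) hjx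
          omega
        rw [hnil]
        simp only [List.flatMap_cons, List.flatMap_nil, List.append_nil, List.nil_append]
        rw [if_pos ⟨hx, trivial⟩]
      · by_cases heq : pvDpF a k = pvMax a x k
        · have htgt : max (pvMax a x k) (pvDpF a k) = pvMax a x k := by omega
          simp only [if_pos hx, if_neg hgt, htgt]
          rw [if_pos (by simpa using heq)]
          simp only [List.flatMap_cons, List.flatMap_nil, List.append_nil]
          rw [if_pos ⟨hx, heq⟩]
        · have htgt : max (pvMax a x k) (pvDpF a k) = pvMax a x k := by omega
          simp only [if_pos hx, if_neg hgt, htgt]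
          rw [if_neg (by simpa using heq)]
          simp only [List.flatMap_cons, List.flatMap_nil, List.append_nil]
          rw [if_neg (fun h => heq h.2), List.append_nil]
    · simp only [if_neg hx]
      simp only [List.flatMap_cons, List.flatMap_nil, List.append_nil]
      rw [if_neg (fun h => hx h.1), List.append_nil]

-- the table after processing the first k elements
theorem pvTable_eq (a : List Int) (k : Nat) (hk : k ≤ a.length) :
    (a.take k).foldl pvStepB []
      = (List.range k).map (fun j => (a.getD j 0, pvDpF a j, pvBacktrackA a (pvDpA a) j)) := by
  induction k with
  | zero => simp
  | succ k ih =>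
    have hkn : k < a.length := by omega
    have htake : a.take (k + 1) = a.take k ++ [a.getD k 0] := by
      rw [List.take_add_one, List.getElem?_eq_getElem hkn, List.getD_eq_getElem a 0 hkn]
      rfl
    rw [htake, List.foldl_append, ih (by omega), List.foldl_cons, List.foldl_nil]
    rw [pvStepB, pvBestB_eq a (a.getD k 0) k]
    have hdp := pvDpF_closed a k
    have hM0 := pvMax_nonneg a (a.getD k 0) k
    rw [List.range_succ, List.map_append]
    by_cases hM : pvMax a (a.getD k 0) k = 0
    · have hdp1 : pvDpF a k = 1 := by rw [hdp, if_pos hM]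
      have hbt : pvBacktrackA a (pvDpA a) k = [[a.getD k 0]] := by
        rw [pvBacktrackA_nf a k hkn, if_pos hdp1]
      simp only []
      rw [if_pos (by simpa using hM)]
      simp [hdp1, hbt]
    · have hdp1 : pvDpF a k = pvMax a (a.getD k 0) k + 1 := by rw [hdp, if_neg hM]
      simp only []
      rw [if_neg (by simpa using hM)]
      have hbt : pvBacktrackA a (pvDpA a) k
          = ((List.range k).flatMap (fun j =>
              if a.getD j 0 < a.getD k 0 ∧ pvDpF a j = pvMax a (a.getD k 0) k then
                pvBacktrackA a (pvDpA a) j else [])).map (fun q => q ++ [a.getD k 0]) := by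
        rw [pvBacktrackA_nf a k hkn, if_neg (by omega), List.map_flatMap]
        congr 1
        funext j
        have hsub : pvDpF a k - 1 = pvMax a (a.getD k 0) k := by omega
        rw [hsub, apply_ite (List.map (fun q => q ++ [a.getD k 0])), List.map_nil]
      simp only [List.map_cons, List.map_nil]
      rw [hdp1, hbt]

-- ===== VERDICT (by name: the statement is the Claim_ definition above) =====
theorem all_lis_spec : Claim_equal_all_lis := by
  intro A C teta _ hpre
  unfold Spec_all_lis
  simp only [all_lis, all_lis_alt]
  rw [pv_allowed_eq A C hpre]
  by_cases hnil : pvAllowedB A C = []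
  · simp [hnil]
  · rw [if_neg hnil, if_neg hnil]
    have htab := pvTable_eq (pvAllowedB A C) (pvAllowedB A C).length le_rfl
    rw [List.take_length] at htab
    rw [htab]
    have hmap : ((List.range (pvAllowedB A C).length).map
          (fun j => ((pvAllowedB A C).getD j 0, pvDpF (pvAllowedB A C) j,
            pvBacktrackA (pvAllowedB A C) (pvDpA (pvAllowedB A C)) j))).map (fun t => t.2.1)
        = pvDpA (pvAllowedB A C) := by
      rw [List.map_map, pvDpA_eq]
      rfl
    rw [hmap]
    have hres : (List.range (pvAllowedB A C).length).foldl
        (fun res i => if (pvDpA (pvAllowedB A C)).getD i 0 ==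
            ((PySem.List.max? (pvDpA (pvAllowedB A C)) (fun v => v)).getD 0) then
          res ++ pvBacktrackA (pvAllowedB A C) (pvDpA (pvAllowedB A C)) i else res) []
        = ((List.range (pvAllowedB A C).length).map
            (fun j => ((pvAllowedB A C).getD j 0, pvDpF (pvAllowedB A C) j,
              pvBacktrackA (pvAllowedB A C) (pvDpA (pvAllowedB A C)) j))).flatMap
            (fun t => if t.2.1 == ((PySem.List.max? (pvDpA (pvAllowedB A C)) (fun v => v)).getD 0)
              then t.2.2 else []) := by
      rw [List.flatMap_map]
      rw [PySem.List.foldl_congr_mem _ _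
          (fun res j => res ++ (if pvDpF (pvAllowedB A C) j ==
              ((PySem.List.max? (pvDpA (pvAllowedB A C)) (fun v => v)).getD 0) then
            pvBacktrackA (pvAllowedB A C) (pvDpA (pvAllowedB A C)) j else [])) _
          (fun res j hj => by
            rw [pvDpA_getD _ _ (List.mem_range.mp hj)]
            split_ifs with hcond
            · beta_reduce; rw [if_pos hcond]
            · beta_reduce; rw [if_neg hcond, List.append_nil])]
      rw [PySem.List.foldl_append_eq_flatMap, List.nil_append]
    rw [hres]
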